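-- pv_equiv track=rewrite | github.com/DonMdas/academic-assistant-backend | semantic_chunking.py | _find_exact_phrase_index
-- ===== SOURCE A (Python) =====
-- def _find_exact_phrase_index(text_tokens, phrase_tokens, start_search=0):
--     if not phrase_tokens:
--         return None
--
--     n = len(text_tokens)
--     m = len(phrase_tokens)
--     if m > n:
--         return None
--
--     token_values = [t["token"] for t in text_tokens]
--     for i in range(max(0, start_search), n - m + 1):
--         if token_values[i:i + m] == phrase_tokens:
--             return i
--     return None
-- ===== SOURCE B (Python) =====
-- # Rabin-Karp-style search: maintain a rolling integer fingerprint of the current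
-- # window and compare full token slices only when the fingerprints agree.
-- def _find_exact_phrase_index(text_tokens, phrase_tokens, start_search=0):
--     m = len(phrase_tokens)
--     if m == 0:
--         return None
--     n = len(text_tokens)
--     if m > n:
--         return None
--     vals = [t["token"] for t in text_tokens]
--     lo = max(0, start_search)
--     if lo > n - m:
--         return None
--
--     def fp(s):
--         total = 0
--         for ch in s:
--             total += ord(ch)
--         return total
--
--     target = 0
--     for p in phrase_tokens:
--         target += fp(p)
--     h = 0
--     for v in vals[lo:lo + m]:
--         h += fp(v)
--     for i in range(lo, n - m + 1):
--         if h == target and vals[i:i + m] == phrase_tokens: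
--             return i
--         if i + m < n:
--             h += fp(vals[i + m]) - fp(vals[i])
--     return None
-- ===== Notes on version B (the rewrite author's own statement) =====
-- stated objective: alternative
-- what changed: Replaces A's direct per-position slice comparison with a Rabin-Karp-style search maintaining a rolling integer fingerprint of the current window, comparing full token slices only when fingerprints agree.
import Mathlib
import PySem

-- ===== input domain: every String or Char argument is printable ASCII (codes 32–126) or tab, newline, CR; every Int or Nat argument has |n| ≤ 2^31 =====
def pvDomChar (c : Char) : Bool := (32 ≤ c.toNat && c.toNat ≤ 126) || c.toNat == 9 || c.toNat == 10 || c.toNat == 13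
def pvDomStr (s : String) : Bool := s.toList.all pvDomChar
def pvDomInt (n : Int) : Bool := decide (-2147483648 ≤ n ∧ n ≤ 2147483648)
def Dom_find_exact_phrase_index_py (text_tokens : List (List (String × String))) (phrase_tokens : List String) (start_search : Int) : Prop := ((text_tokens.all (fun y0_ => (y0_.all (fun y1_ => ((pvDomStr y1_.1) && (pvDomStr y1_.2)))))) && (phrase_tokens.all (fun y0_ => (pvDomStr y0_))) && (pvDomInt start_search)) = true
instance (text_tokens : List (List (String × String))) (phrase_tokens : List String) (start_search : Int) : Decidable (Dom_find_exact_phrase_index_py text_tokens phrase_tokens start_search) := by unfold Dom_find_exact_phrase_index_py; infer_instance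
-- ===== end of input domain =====

-- B replaces A's per-position slice comparison by a rolling integer fingerprint
-- of the window (Rabin-Karp style), comparing full slices only on fingerprint hits.

-- ===== PORT A =====
-- t["token"]: first-match lookup; KeyError (missing key) is excluded by Pre_, so getD "" is never the value used
def pvLookTok (t : List (String × String)) : String :=
  ((t.find? (fun p => p.1 == "token")).map (·.2)).getD ""

-- the 'for i in range(...)' loop of A with its early return
def loopA (vals phrase : List String) (m : Int) : List Int → Option Int
  | [] => none
  | i :: rest =>
    if PySem.List.slice vals (some i) (some (i + m)) = phrase then some i
    else loopA vals phrase m rest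

def find_exact_phrase_index_py (text_tokens : List (List (String × String))) (phrase_tokens : List String) (start_search : Int) : Option Int :=
  if phrase_tokens = [] then none
  else
    let n : Int := text_tokens.length
    let m : Int := phrase_tokens.length
    if m > n then none
    else
      let token_values := text_tokens.map pvLookTok
      loopA token_values phrase_tokens m (PySem.List.pyRange (max 0 start_search) (n - m + 1) 1)

-- ===== PORT B =====
-- fp(s): sum of ord over the characters of s (B's inner accumulation loop)
def pvFp (s : String) : Int := s.toList.foldl (fun t c => t + (c.toNat : Int)) 0

-- B's 'for i in range(...)' loop carrying the rolling fingerprint h;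
-- vals[i+m] / vals[i] are in range under the guard, ported as pyGetD
def loopB (vals phrase : List String) (m n target : Int) : List Int → Int → Option Int
  | [], _ => none
  | i :: rest, h =>
    if h = target ∧ PySem.List.slice vals (some i) (some (i + m)) = phrase then some i
    else loopB vals phrase m n target rest
      (if i + m < n then h + pvFp (PySem.List.pyGetD vals (i + m) "") - pvFp (PySem.List.pyGetD vals i "") else h)

def find_exact_phrase_index_py_alt (text_tokens : List (List (String × String))) (phrase_tokens : List String) (start_search : Int) : Option Int :=
  let m : Int := phrase_tokens.length
  if m = 0 then none
  else
    let n : Int := text_tokens.length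
    if m > n then none
    else
      let vals := text_tokens.map pvLookTok
      let lo : Int := max 0 start_search
      if lo > n - m then none
      else
        let target := phrase_tokens.foldl (fun a p => a + pvFp p) 0
        let h := (PySem.List.slice vals (some lo) (some (lo + m))).foldl (fun a v => a + pvFp v) 0
        loopB vals phrase_tokens m n target (PySem.List.pyRange lo (n - m + 1) 1) h

-- ===== PRECONDITION & SPEC =====
-- Pre_ excludes exactly the inputs on which the Python A raises KeyError: a token dict
-- without the key "token", reached only when the phrase is nonempty and not longer than the text.
def Pre_find_exact_phrase_index_py (text_tokens : List (List (String × String))) (phrase_tokens : List String) (start_search : Int) : Prop :=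
  (phrase_tokens ≠ [] ∧ (phrase_tokens.length : Int) ≤ (text_tokens.length : Int)) →
    ∀ t ∈ text_tokens, (t.find? (fun p => p.1 == "token")).isSome
instance (text_tokens : List (List (String × String))) (phrase_tokens : List String) (start_search : Int) : Decidable (Pre_find_exact_phrase_index_py text_tokens phrase_tokens start_search) := by unfold Pre_find_exact_phrase_index_py; infer_instance

def pvWitness_find_exact_phrase_index_py : (List (List (String × String))) × List String × Int :=
  ([[("token", "a")], [("token", "b")]], ["b"], 0)

def Spec_find_exact_phrase_index_py (text_tokens : List (List (String × String))) (phrase_tokens : List String) (start_search : Int) (out : Option Int) : Prop := out = find_exact_phrase_index_py_alt text_tokens phrase_tokens start_search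
instance (text_tokens : List (List (String × String))) (phrase_tokens : List String) (start_search : Int) (out : Option Int) : Decidable (Spec_find_exact_phrase_index_py text_tokens phrase_tokens start_search out) := by unfold Spec_find_exact_phrase_index_py; infer_instance

-- ===== CLAIM (what is proved, stated in full; the proofs are below) =====
def Claim_equal_find_exact_phrase_index_py : Prop := ∀ (text_tokens : List (List (String × String))) (phrase_tokens : List String) (start_search : Int), Dom_find_exact_phrase_index_py text_tokens phrase_tokens start_search → Pre_find_exact_phrase_index_py text_tokens phrase_tokens start_search → Spec_find_exact_phrase_index_py text_tokens phrase_tokens start_search (find_exact_phrase_index_py text_tokens phrase_tokens start_search)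

-- ===== LEMMAS AND PROOFS =====

-- fingerprint of the window of length m starting at i
def pvW (vals : List String) (m i : Nat) : Int := (((vals.drop i).take m).map pvFp).sum

lemma pvFoldSum (l : List String) (a : Int) :
    l.foldl (fun a p => a + pvFp p) a = a + (l.map pvFp).sum := by
  induction l generalizing a with
  | nil => simp
  | cons x xs ih => simp [List.foldl, ih]; ring

lemma pvSliceEq (vals : List String) (i m : Int) (hi : 0 ≤ i) (hm : 0 ≤ m) :
    PySem.List.slice vals (some i) (some (i + m)) = (vals.drop i.toNat).take m.toNat := by
  rw [PySem.List.slice_toNat vals hi (by omega)]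
  congr 1
  omega

lemma pvRoll (vals : List String) (m k : Nat) (hm : 1 ≤ m) (hk : k + m < vals.length) :
    pvW vals m (k + 1)
      = pvW vals m k + pvFp (vals.getD (k + m) "") - pvFp (vals.getD k "") := by
  unfold pvW
  have hkl : k < vals.length := by omega
  obtain ⟨m', rfl⟩ : ∃ m', m = m' + 1 := ⟨m - 1, by omega⟩
  have hkm : k + (m' + 1) < vals.length := hk
  have h3 : (vals.drop (k + 1))[m']? = some vals[k + (m' + 1)] := by
    rw [List.getElem?_drop, show k + 1 + m' = k + (m' + 1) by omega]
    exact List.getElem?_eq_getElem (by omega)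
  have hL : (((vals.drop (k + 1)).take (m' + 1)).map pvFp).sum
      = (((vals.drop (k + 1)).take m').map pvFp).sum + pvFp vals[k + (m' + 1)] := by
    rw [List.take_add_one, h3]
    simp
  have hR : (((vals.drop k).take (m' + 1)).map pvFp).sum
      = pvFp vals[k] + (((vals.drop (k + 1)).take m').map pvFp).sum := by
    rw [List.drop_eq_getElem_cons hkl, List.take_succ_cons]
    simp
  rw [hL, hR, List.getD_eq_getElem vals "" hkm, List.getD_eq_getElem vals "" hkl]
  ring

-- main loop invariant: with h the fingerprint of the window at i, B's loop equals A's
lemma pvLoopEq (vals phrase : List String) (hm : phrase ≠ []) :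
    ∀ (k : Nat) (i h : Int), 0 ≤ i →
    (((vals.length : Int) - phrase.length + 1) - i).toNat = k →
    h = pvW vals phrase.length i.toNat →
    loopB vals phrase phrase.length vals.length ((phrase.map pvFp).sum)
        (PySem.List.pyRange i ((vals.length : Int) - phrase.length + 1) 1) h
      = loopA vals phrase phrase.length
        (PySem.List.pyRange i ((vals.length : Int) - phrase.length + 1) 1) := by
  intro k
  induction k with
  | zero =>
    intro i h hi hk hh
    rw [PySem.List.pyRange_one_eq_nil (by omega)]
    rfl
  | succ k ih =>
    intro i h hi hk hh
    have hilt : i < (vals.length : Int) - phrase.length + 1 := by omega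
    rw [PySem.List.pyRange_one_cons hilt]
    simp only [loopA, loopB]
    have hmz : (0 : Int) ≤ (phrase.length : Int) := by omega
    have hslice : PySem.List.slice vals (some i) (some (i + (phrase.length : Int)))
        = (vals.drop i.toNat).take phrase.length := by
      rw [pvSliceEq vals i (phrase.length : Int) hi hmz]
      simp
    rw [hslice]
    by_cases hwin : (vals.drop i.toNat).take phrase.length = phrase
    · have htgt : h = (phrase.map pvFp).sum := by
        rw [hh]; unfold pvW; rw [hwin]
      simp [hwin, htgt]
    · rw [if_neg hwin, if_neg (fun hc => hwin hc.2)]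
      by_cases hnext : i + 1 < (vals.length : Int) - phrase.length + 1
      · have hguard : i + (phrase.length : Int) < (vals.length : Int) := by omega
        have hphr : 1 ≤ phrase.length := List.length_pos_of_ne_nil hm
        have hkm : i.toNat + phrase.length < vals.length := by omega
        have hnewh : (if i + (phrase.length : Int) < (vals.length : Int) then
              h + pvFp (PySem.List.pyGetD vals (i + phrase.length) "")
                - pvFp (PySem.List.pyGetD vals i "") else h)
            = pvW vals phrase.length (i + 1).toNat := by
          rw [if_pos hguard]
          rw [PySem.List.pyGetD_of_nonneg vals "" (by omega : (0:Int) ≤ i + phrase.length),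
              PySem.List.pyGetD_of_nonneg vals "" hi]
          have h1 : (i + (phrase.length : Int)).toNat = i.toNat + phrase.length := by omega
          have h2 : (i + 1).toNat = i.toNat + 1 := by omega
          rw [h1, h2, pvRoll vals phrase.length i.toNat hphr hkm, hh]
        rw [hnewh]
        exact ih (i + 1) _ (by omega) (by omega) rfl
      · rw [PySem.List.pyRange_one_eq_nil (by omega : (vals.length : Int) - phrase.length + 1 ≤ i + 1)]
        rfl

-- ===== VERDICT (by name: the statement is the Claim_ definition above) =====
theorem find_exact_phrase_index_py_spec : Claim_equal_find_exact_phrase_index_py := by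
  intro text_tokens phrase_tokens start_search _ _
  unfold Spec_find_exact_phrase_index_py
  unfold find_exact_phrase_index_py find_exact_phrase_index_py_alt
  by_cases hph : phrase_tokens = []
  · simp [hph]
  · have hm0 : ¬ ((phrase_tokens.length : Int) = 0) := by simp [hph]
    rw [if_neg hph, if_neg hm0]
    by_cases hmn : (phrase_tokens.length : Int) > (text_tokens.length : Int)
    · rw [if_pos hmn, if_pos hmn]
    · rw [if_neg hmn, if_neg hmn]
      have hlen : ((text_tokens.map pvLookTok).length : Int) = (text_tokens.length : Int) := by
        simp
      by_cases hout : max 0 start_search > (text_tokens.length : Int) - phrase_tokens.length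
      · rw [if_pos hout]
        rw [PySem.List.pyRange_one_eq_nil (by omega)]
        rfl
      · rw [if_neg hout]
        have hlo : (0 : Int) ≤ max 0 start_search := le_max_left 0 start_search
        have hinit : (PySem.List.slice (text_tokens.map pvLookTok) (some (max 0 start_search))
              (some (max 0 start_search + phrase_tokens.length))).foldl
              (fun a v => a + pvFp v) 0
            = pvW (text_tokens.map pvLookTok) phrase_tokens.length (max 0 start_search).toNat := by
          rw [pvSliceEq _ _ _ hlo (by omega), pvFoldSum]
          unfold pvW
          simp
        rw [hinit, pvFoldSum]
        simp only [zero_add]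
        have := pvLoopEq (text_tokens.map pvLookTok) phrase_tokens hph
          ((((text_tokens.map pvLookTok).length : Int) - phrase_tokens.length + 1)
            - max 0 start_search).toNat
          (max 0 start_search) _ hlo rfl rfl
        rw [hlen] at this
        exact this.symm
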